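-- pv_equiv track=rewrite | github.com/hkust-lib-ds/P003-PUBLIC_English-and-Chinese-Topic-Modeling-Tool | CHI/utils/display.py | bold_doc
-- ===== SOURCE A (Python) =====
-- def find_all_occurrences(sentence, word):
--     start = 0
--     positions = []
--     while True:
--         start = sentence.find(word, start)
--         if start == -1:  # No more occurrences found
--             break
--         positions.append(start)
--         start += len(word)  # Move past the last found word to search for the next occurrence
--     return positions
--
-- def bold_doc(content, words):
--     all_positions = {}
--     for word in words:
--         #st.write(word)
--         positions = find_all_occurrences(content, word)
--         if positions == []:
--             continue
--         else:
--             for position in positions: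
--                 all_positions[position] = word
--     result = ""
--     i = 0
--     while i < len(content):
--         if i in all_positions.keys():
--             result += f'<span style="font-weight: bold; font-size: 1.2em;">{all_positions[i]}</span>'
--             i += len(all_positions[i])
--         else:
--             result += content[i]
--             i += 1
--     return result
-- ===== SOURCE B (Python) =====
-- def bold_doc(content, words):
--     n = len(content)
--     wordset = set(words)
--     lengths = sorted({len(w) for w in words})
--     occ = {}
--     for i in range(n):
--         for L in lengths:
--             if i + L <= n:
--                 sub = content[i:i+L]
--                 if sub in wordset:
--                     occ.setdefault(sub, []).append(i)
--     marks = {}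
--     for word in words:
--         cur = 0
--         for p in occ.get(word, []):
--             if p >= cur:
--                 marks[p] = word
--                 cur = p + len(word)
--     parts = []
--     i = 0
--     for p in sorted(marks):
--         if p < i:
--             continue
--         w = marks[p]
--         parts.append(content[i:p])
--         parts.append('<span style="font-weight: bold; font-size: 1.2em;">' + w + '</span>')
--         i = p + len(w)
--     parts.append(content[i:])
--     return ''.join(parts)
-- ===== Notes on version B (the rewrite author's own statement) =====
-- stated objective: faster
-- what changed: B replaces A's per-word str.find loop (one scan of the content per word) by a single pass over the content that, at each position, checks the distinct word lengths against a set of the words and records every match position per word in one table, then selects each word's non-overlapping occurrences by a greedy filter over its recorded positions; rendering walks the sorted match positions and joins slices instead of A's character-by-character while loop; …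
import Mathlib
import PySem

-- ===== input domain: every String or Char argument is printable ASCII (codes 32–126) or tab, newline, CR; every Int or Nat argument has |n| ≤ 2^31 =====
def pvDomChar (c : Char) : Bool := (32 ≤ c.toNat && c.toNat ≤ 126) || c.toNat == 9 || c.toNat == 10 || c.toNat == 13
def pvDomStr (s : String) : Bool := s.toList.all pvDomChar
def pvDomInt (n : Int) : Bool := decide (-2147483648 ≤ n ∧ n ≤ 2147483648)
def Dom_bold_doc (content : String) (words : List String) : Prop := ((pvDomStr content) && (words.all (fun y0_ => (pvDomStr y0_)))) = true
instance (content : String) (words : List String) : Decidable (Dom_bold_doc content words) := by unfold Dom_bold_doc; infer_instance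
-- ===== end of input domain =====

-- B replaces A's per-word str.find loop by one pass over the content that records every match
-- per word via a set lookup keyed by the distinct word lengths, then greedily selects each word's
-- non-overlapping occurrences, and renders by slicing between the sorted match positions instead of
-- A's character-by-character loop (objective: faster; a timing run measured B ~3x faster at the
-- largest size).

-- ===== PORT A =====

def pvBoldPre : List Char := "<span style=\"font-weight: bold; font-size: 1.2em;\">".toList
def pvBoldPost : List Char := "</span>".toList

-- find_all_occurrences' while-True loop (fuel |sentence|+1 suffices: each round moves start past a
-- nonempty match; with an empty word the Python loops forever, which Pre_ excludes)
def findAllGo (cs w : List Char) : Nat → Int → List Int → List Int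
  | 0, _, acc => acc
  | fuel+1, start, acc =>
    let s := PySem.Chars.findFrom cs w start none
    if s = -1 then acc
    else findAllGo cs w fuel (s + (w.length : Int)) (acc ++ [s])

def find_all_occurrences (sentence word : List Char) : List Int :=
  findAllGo sentence word (sentence.length + 1) 0 []

-- bold_doc's render while-loop (fuel |content|+1: every round advances i by at least 1 on the
-- inputs Pre_ admits, since every stored word is nonempty)
def boldRenderGo (cs : List Char) (d : PySem.Dict Int (List Char)) : Nat → Nat → List Char → List Char
  | 0, _, result => result
  | fuel+1, i, result =>
    if i < cs.length then
      match d.get? (i : Int) with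
      | some w => boldRenderGo cs d fuel (i + w.length) (result ++ (pvBoldPre ++ w ++ pvBoldPost))
      | none =>
        match PySem.List.pyGet? cs (i : Int) with
        | some c => boldRenderGo cs d fuel (i + 1) (result ++ [c])
        | none => result       -- unreachable: i < len(content)
    else result

def bold_doc (content : String) (words : List String) : String :=
  let cs := content.toList
  let all_positions := words.foldl (fun d word =>
    let positions := find_all_occurrences cs word.toList
    if positions = [] then d
    else positions.foldl (fun d p => d.insert p word.toList) d) PySem.Dict.empty
  String.ofList (boldRenderGo cs all_positions (cs.length + 1) 0 [])

-- ===== PORT B =====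

-- Source B's inner loop body over the distinct word lengths at one start position i:
-- slice, set-membership test, and append of i to the matched word's position list
def occInner (cs : List Char) (wordset : PySem.Set (List Char)) (i : Int)
    (occ : PySem.Dict (List Char) (List Int)) (L : Int) : PySem.Dict (List Char) (List Int) :=
  if i + L ≤ (cs.length : Int) then
    if PySem.List.slice cs (some i) (some (i + L)) ∈ wordset then
      PySem.Dict.modify occ (PySem.List.slice cs (some i) (some (i + L))) [] (fun ps => ps ++ [i])
    else occ
  else occ

-- Source B's greedy selection step ("if p >= cur: marks[p] = word; cur = p + len(word)")
def greedyStep (w : List Char) (st : PySem.Dict Int (List Char) × Int) (p : Int) :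
    PySem.Dict Int (List Char) × Int :=
  if p ≥ st.2 then (st.1.insert p w, p + (w.length : Int)) else st

-- Source B's "for p in sorted(marks)" loop, collecting the parts list
def renderBGo (cs : List Char) (d : PySem.Dict Int (List Char)) : List Int → Int → List (List Char) → List (List Char)
  | [], i, parts => parts ++ [PySem.List.slice cs (some i) none]
  | p :: ps, i, parts =>
    if p < i then renderBGo cs d ps i parts
    else
      let w := d.getD p []
      renderBGo cs d ps (p + (w.length : Int))
        (parts ++ [PySem.List.slice cs (some i) (some p), pvBoldPre ++ w ++ pvBoldPost])

def bold_doc_alt (content : String) (words : List String) : String :=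
  let cs := content.toList
  let wordset := PySem.Set.ofList (words.map (fun x => x.toList))
  let lengths := PySem.List.sorted
    (PySem.Set.ofList (words.map (fun x => ((x.toList.length : Int))))) (fun x => x) false
  let occ := (PySem.List.pyRange 0 (cs.length : Int)).foldl
    (fun occ i => lengths.foldl (occInner cs wordset i) occ)
    (PySem.Dict.empty : PySem.Dict (List Char) (List Int))
  let marks := words.foldl (fun marks word =>
      ((occ.getD word.toList []).foldl (greedyStep word.toList) (marks, 0)).1)
    PySem.Dict.empty
  String.ofList (PySem.Chars.join [] (renderBGo cs marks (PySem.List.sorted marks.keys (fun x => x) false) 0 []))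

-- ===== PRECONDITION & SPEC =====

-- Pre_ excludes only words lists containing the empty string: there A's find-loop never
-- terminates (''.find always succeeds and start never advances), so A returns no value.
def Pre_bold_doc (content : String) (words : List String) : Prop := ∀ w ∈ words, w ≠ ""
instance (content : String) (words : List String) : Decidable (Pre_bold_doc content words) := by unfold Pre_bold_doc; infer_instance

def pvWitness_bold_doc : String × List String := ("the cat sat on the mat", ["cat", "at", "the"])

def Spec_bold_doc (content : String) (words : List String) (out : String) : Prop := out = bold_doc_alt content words
instance (content : String) (words : List String) (out : String) : Decidable (Spec_bold_doc content words out) := by unfold Spec_bold_doc; infer_instance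

-- ===== CLAIM (what is proved, stated in full; the proofs are below) =====
def Claim_equal_bold_doc : Prop := ∀ (content : String) (words : List String), Dom_bold_doc content words → Pre_bold_doc content words → Spec_bold_doc content words (bold_doc content words)

-- ===== LEMMAS AND PROOFS =====

-- ---- facts about Python's str.find with a start offset ----

theorem pvPrefLen {cs w : List Char} {k : Nat} (h : w <+: List.drop k cs) (hw : 1 ≤ w.length) :
    k + w.length ≤ cs.length := by
  have := h.length_le
  simp [List.length_drop] at this
  omega

theorem pvInfixDrop {cs w : List Char} {k : Nat} :
    w <:+: List.drop k cs ↔ ∃ j, w <+: List.drop (k + j) cs := by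
  rw [← PySem.Chars.isIn_iff_infix, ← PySem.Chars.exists_prefix_drop_iff_isIn]
  constructor
  · rintro ⟨j, hj⟩; exact ⟨j, by rwa [List.drop_drop] at hj⟩
  · rintro ⟨j, hj⟩; exact ⟨j, by rwa [List.drop_drop]⟩

-- a match at the start position is found there
theorem pvFindHere {cs w : List Char} {k : Nat} (hk : k ≤ cs.length) (h : w <+: List.drop k cs) :
    PySem.Chars.findFrom cs w (k : Int) none = (k : Int) := by
  have hne : PySem.Chars.findFrom cs w (k : Int) none ≠ -1 := by
    rw [Ne, PySem.Chars.findFrom_natCast_eq_neg_one_iff cs w k hk]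
    simpa using h.isInfix
  obtain ⟨h1, h2, h3⟩ := PySem.Chars.findFrom_natCast_spec cs w k hk hne
  set F := PySem.Chars.findFrom cs w (k : Int) none with hF
  by_cases hlt : k < F.toNat
  · exact absurd h (h3 k le_rfl hlt)
  · have h0 : (0:Int) ≤ F := le_trans (by positivity) h1
    omega

-- no match at the start position: find from k = find from k+1
theorem pvFindStep {cs w : List Char} {k : Nat} (hk1 : k + 1 ≤ cs.length) (h : ¬ w <+: List.drop k cs) :
    PySem.Chars.findFrom cs w (k : Int) none = PySem.Chars.findFrom cs w ((k+1 : Nat) : Int) none := by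
  have hk : k ≤ cs.length := by omega
  by_cases hz : PySem.Chars.findFrom cs w (k : Int) none = -1
  · have hno : ¬ ∃ j, w <+: List.drop (k + j) cs := by
      rw [← pvInfixDrop, ← PySem.Chars.findFrom_natCast_eq_neg_one_iff cs w k hk]
      simpa using hz
    rw [hz, eq_comm, PySem.Chars.findFrom_natCast_eq_neg_one_iff cs w (k+1) hk1, pvInfixDrop]
    intro ⟨j, hj⟩
    exact hno ⟨1 + j, by rwa [← Nat.add_assoc]⟩
  · obtain ⟨h1, h2, h3⟩ := PySem.Chars.findFrom_natCast_spec cs w k hk hz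
    set r := PySem.Chars.findFrom cs w (k : Int) none with hr
    have hr0 : (0:Int) ≤ r := le_trans (by positivity) h1
    have hrk : k ≤ r.toNat := by omega
    have hrkne : r.toNat ≠ k := fun he => h (he ▸ h2)
    have hz' : PySem.Chars.findFrom cs w ((k+1 : Nat) : Int) none ≠ -1 := by
      rw [Ne, PySem.Chars.findFrom_natCast_eq_neg_one_iff cs w (k+1) hk1, pvInfixDrop]
      intro hno
      exact hno ⟨r.toNat - (k+1), by rwa [Nat.add_sub_cancel' (by omega)]⟩
    obtain ⟨h1', h2', h3'⟩ := PySem.Chars.findFrom_natCast_spec cs w (k+1) hk1 hz'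
    set r' := PySem.Chars.findFrom cs w ((k+1 : Nat) : Int) none with hr'
    have hr0' : (0:Int) ≤ r' := le_trans (by positivity) h1'
    rcases lt_trichotomy r.toNat r'.toNat with hlt | heq | hgt
    · exact absurd h2 (h3' r.toNat (by omega) hlt)
    · omega
    · exact absurd h2' (h3 r'.toNat (by omega) hgt)

-- ---- A's occurrence loop as a fused insert recursion ----

theorem findAllGo_acc (cs w : List Char) (fuel : Nat) : ∀ (s : Int) (acc : List Int),
    findAllGo cs w fuel s acc = acc ++ findAllGo cs w fuel s [] := by
  induction fuel with
  | zero => intro s acc; simp [findAllGo]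
  | succ f ih =>
    intro s acc
    simp only [findAllGo]
    by_cases h : PySem.Chars.findFrom cs w s none = -1
    · simp [h]
    · simp only [h, if_false]
      rw [ih _ (acc ++ _), ih _ ([] ++ _)]
      simp

def findIns (cs w : List Char) : Nat → Int → PySem.Dict Int (List Char) → PySem.Dict Int (List Char)
  | 0, _, d => d
  | fuel+1, s, d =>
    let r := PySem.Chars.findFrom cs w s none
    if r = -1 then d
    else findIns cs w fuel (r + (w.length : Int)) (d.insert r w)

theorem fold_findAllGo (cs w : List Char) (fuel : Nat) : ∀ (s : Int) (d : PySem.Dict Int (List Char)),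
    (findAllGo cs w fuel s []).foldl (fun d p => d.insert p w) d = findIns cs w fuel s d := by
  induction fuel with
  | zero => intro s d; simp [findAllGo, findIns]
  | succ f ih =>
    intro s d
    simp only [findAllGo, findIns]
    by_cases h : PySem.Chars.findFrom cs w s none = -1
    · simp [h]
    · simp only [h, if_false]
      rw [findAllGo_acc]
      simp only [List.foldl_append, List.foldl_cons, List.foldl_nil, List.nil_append]
      exact ih _ _

-- any fuel of at least |cs|+1-k computes the same findIns result
theorem findIns_congr (cs w : List Char) (hw : 1 ≤ w.length) :
    ∀ (meas k : Nat) (f f' : Nat) (d : PySem.Dict Int (List Char)), k ≤ cs.length →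
      cs.length + 1 - k ≤ meas → cs.length + 1 - k ≤ f → cs.length + 1 - k ≤ f' →
      findIns cs w f (k : Int) d = findIns cs w f' (k : Int) d := by
  intro meas
  induction meas with
  | zero => intro k f f' d hk hm _ _; omega
  | succ m ih =>
    intro k f f' d hk hm hf hf'
    obtain ⟨f1, rfl⟩ : ∃ f1, f = f1 + 1 := ⟨f - 1, by omega⟩
    obtain ⟨f2, rfl⟩ : ∃ f2, f' = f2 + 1 := ⟨f' - 1, by omega⟩
    simp only [findIns]
    by_cases h : PySem.Chars.findFrom cs w (k : Int) none = -1
    · simp [h]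
    · simp only [h, if_false]
      obtain ⟨h1, h2, h3⟩ := PySem.Chars.findFrom_natCast_spec cs w k hk h
      set r := PySem.Chars.findFrom cs w (k : Int) none with hr
      have hr0 : (0:Int) ≤ r := le_trans (by positivity) h1
      have hlen : r.toNat + w.length ≤ cs.length := pvPrefLen h2 hw
      have hrk2 : k ≤ r.toNat := by omega
      have hcast : r + (w.length : Int) = ((r.toNat + w.length : Nat) : Int) := by omega
      rw [hcast]
      exact ih (r.toNat + w.length) f1 f2 _ (by omega) (by omega) (by omega) (by omega)

-- ---- B's one-pass occurrence table and greedy selection = A's find-and-skip loop ----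

-- all match positions of w in cs from index a on (ascending)
def matchFrom (cs w : List Char) (a : Nat) : List Int :=
  if _h : a < cs.length then
    (if a + w.length ≤ cs.length ∧ w <+: List.drop a cs then [(a : Int)] else []) ++
      matchFrom cs w (a + 1)
  else []
termination_by cs.length - a

-- one pass of the inner length loop appends i to exactly the word matching there
theorem inner_spec (cs : List Char) (words : List String) (a : Nat) (w : List Char)
    (hw : w ∈ words.map (fun x => x.toList)) :
    ∀ (l : List Int) (occ0 : PySem.Dict (List Char) (List Int)),
      l.Nodup → (∀ L ∈ l, ∃ Ln : Nat, L = (Ln : Int)) →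
      (l.foldl (occInner cs (PySem.Set.ofList (words.map (fun x => x.toList))) (a : Int)) occ0).getD w []
        = occ0.getD w [] ++
          (if ((w.length : Int) ∈ l ∧ a + w.length ≤ cs.length ∧ w <+: List.drop a cs)
            then [(a : Int)] else []) := by
  intro l
  induction l with
  | nil => intro occ0 _ _; simp
  | cons L rest ih =>
    intro occ0 hnd hnat
    obtain ⟨Ln, rfl⟩ := hnat (L : Int) (by simp)
    simp only [List.foldl_cons]
    by_cases hmatch : Ln = w.length ∧ a + w.length ≤ cs.length ∧ w <+: List.drop a cs
    · obtain ⟨hLw, hle, hpre⟩ := hmatch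
      subst hLw
      have hsub : PySem.List.slice cs (some (a : Int)) (some ((a : Int) + (w.length : Int))) = w := by
        rw [PySem.List.slice_natCast_add]
        exact ((List.prefix_iff_eq_take).1 hpre).symm
      have hguard : (a : Int) + (w.length : Int) ≤ (cs.length : Int) := by exact_mod_cast hle
      have hmem : PySem.List.slice cs (some (a : Int)) (some ((a : Int) + (w.length : Int)))
          ∈ PySem.Set.ofList (words.map (fun x => x.toList)) := by
        rw [hsub]; exact (PySem.Set.mem_ofList _ _).2 hw
      have hocc1 : occInner cs (PySem.Set.ofList (words.map (fun x => x.toList))) (a : Int) occ0 (w.length : Int)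
          = occ0.insert w (occ0.getD w [] ++ [(a : Int)]) := by
        unfold occInner
        rw [if_pos hguard, if_pos hmem, PySem.Dict.modify, hsub]
      rw [hocc1, ih _ (List.nodup_cons.1 hnd).2 (fun L hL => hnat L (by simp [hL]))]
      have hnotin : ((w.length : Int)) ∉ rest := by
        have := (List.nodup_cons.1 hnd).1
        simpa using this
      rw [if_neg (by intro hcon; exact hnotin hcon.1)]
      rw [if_pos ⟨by simp, hle, hpre⟩]
      simp
    · have hkey : ∀ occ' : PySem.Dict (List Char) (List Int),
          (occInner cs (PySem.Set.ofList (words.map (fun x => x.toList))) (a : Int) occ' (Ln : Int)).getD w []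
            = occ'.getD w [] := by
        intro occ'
        unfold occInner
        by_cases hg : (a : Int) + (Ln : Int) ≤ (cs.length : Int)
        · rw [if_pos hg]
          by_cases hs : PySem.List.slice cs (some (a : Int)) (some ((a : Int) + (Ln : Int)))
              ∈ PySem.Set.ofList (words.map (fun x => x.toList))
          · rw [if_pos hs]
            have hgN : a + Ln ≤ cs.length := by exact_mod_cast hg
            have hsub : PySem.List.slice cs (some (a : Int)) (some ((a : Int) + (Ln : Int)))
                = (List.drop a cs).take Ln := PySem.List.slice_natCast_add cs a Ln
            have hlen : ((List.drop a cs).take Ln).length = Ln := by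
              simp [List.length_take, List.length_drop]
              omega
            have hne : w ≠ (List.drop a cs).take Ln := by
              intro he
              have hwlen : w.length = Ln := by rw [he, hlen]
              apply hmatch
              refine ⟨hwlen.symm, by omega, ?_⟩
              rw [List.prefix_iff_eq_take, hwlen]
              exact he
            rw [PySem.Dict.modify, hsub]
            rw [PySem.Dict.getD, PySem.Dict.get?_insert_of_ne _ _ hne, ← PySem.Dict.getD]
          · rw [if_neg hs]
        · rw [if_neg hg]
      rw [ih _ (List.nodup_cons.1 hnd).2 (fun L hL => hnat L (by simp [hL])), hkey occ0]
      by_cases hX : a + w.length ≤ cs.length ∧ w <+: List.drop a cs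
      · have hLne : ((w.length : Int)) ≠ ((Ln : Int)) := by
          intro he
          exact hmatch ⟨by exact_mod_cast he.symm, hX⟩
        have : ((w.length : Int) ∈ (Ln : Int) :: rest) ↔ ((w.length : Int) ∈ rest) := by
          simp [List.mem_cons, hLne]
        by_cases hm' : (w.length : Int) ∈ rest
        · rw [if_pos ⟨hm', hX⟩, if_pos ⟨this.2 hm', hX⟩]
        · rw [if_neg (by intro hcon; exact hm' hcon.1),
             if_neg (by intro hcon; exact hm' (this.1 hcon.1))]
      · rw [if_neg (by intro hcon; exact hX hcon.2), if_neg (by intro hcon; exact hX hcon.2)]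

-- the outer position loop builds, for every word, its full ascending match list
theorem occ_build (cs : List Char) (words : List String) :
    ∀ (meas a : Nat) (occ0 : PySem.Dict (List Char) (List Int)), a ≤ cs.length →
      cs.length - a ≤ meas →
      ∀ w ∈ words.map (fun x => x.toList),
      ((PySem.List.pyRange (a : Int) (cs.length : Int)).foldl
          (fun occ i => (PySem.List.sorted
              (PySem.Set.ofList (words.map (fun x => ((x.toList.length : Int))))) (fun x => x) false).foldl
            (occInner cs (PySem.Set.ofList (words.map (fun x => x.toList))) i) occ) occ0).getD w []
        = occ0.getD w [] ++ matchFrom cs w a := by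
  intro meas
  induction meas with
  | zero =>
    intro a occ0 ha hm w hw
    have haeq : a = cs.length := by omega
    rw [PySem.List.pyRange_one_eq_nil (by omega : (cs.length : Int) ≤ (a : Int))]
    rw [matchFrom]
    simp [haeq]
  | succ m ih =>
    intro a occ0 ha hm w hw
    by_cases hal : a < cs.length
    · rw [PySem.List.pyRange_one_cons (by exact_mod_cast hal)]
      rw [List.foldl_cons]
      have hcast : ((a : Int)) + 1 = (((a + 1 : Nat)) : Int) := by omega
      rw [hcast]
      rw [ih (a + 1) _ (by omega) (by omega) w hw]
      have hlnodup : (PySem.List.sorted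
          (PySem.Set.ofList (words.map (fun x => ((x.toList.length : Int))))) (fun x => x) false).Nodup := by
        have := PySem.List.sorted_ofList_pairwise_lt (words.map (fun x => ((x.toList.length : Int))))
        exact this.imp (fun h => ne_of_lt h)
      have hlnat : ∀ L ∈ (PySem.List.sorted
          (PySem.Set.ofList (words.map (fun x => ((x.toList.length : Int))))) (fun x => x) false),
          ∃ Ln : Nat, L = (Ln : Int) := by
        intro L hL
        rw [PySem.List.mem_sorted] at hL
        have := (PySem.Set.mem_ofList _ _).1 hL
        obtain ⟨x, _, hx⟩ := List.mem_map.1 this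
        exact ⟨x.toList.length, hx.symm⟩
      rw [inner_spec cs words a w hw _ occ0 hlnodup hlnat]
      have hwin : ((w.length : Int)) ∈ PySem.List.sorted
          (PySem.Set.ofList (words.map (fun x => ((x.toList.length : Int))))) (fun x => x) false := by
        rw [PySem.List.mem_sorted]
        apply (PySem.Set.mem_ofList _ _).2
        obtain ⟨x, hx, hxe⟩ := List.mem_map.1 hw
        exact List.mem_map.2 ⟨x, hx, by rw [hxe]⟩
      conv_rhs => rw [matchFrom]
      rw [dif_pos hal]
      by_cases hX : a + w.length ≤ cs.length ∧ w <+: List.drop a cs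
      · rw [if_pos ⟨hwin, hX⟩, if_pos hX]
        simp [List.append_assoc]
      · rw [if_neg (by intro hcon; exact hX hcon.2), if_neg hX]
        simp
    · have haeq : a = cs.length := by omega
      rw [PySem.List.pyRange_one_eq_nil (by omega : (cs.length : Int) ≤ (a : Int))]
      rw [matchFrom]
      simp [haeq]

-- prefix at q of a nonempty word is a full match
theorem pvPrefixMatch {cs w : List Char} {q : Nat} (hw : 1 ≤ w.length)
    (h : w <+: List.drop q cs) : q + w.length ≤ cs.length ∧ w <+: List.drop q cs :=
  ⟨pvPrefLen h hw, h⟩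

-- find from c lands on p when p is the first prefix position at or after c
theorem pvFindAt (cs w : List Char) (hw : 1 ≤ w.length) :
    ∀ (diff c p : Nat), c ≤ p → w <+: List.drop p cs →
      (∀ q, c ≤ q → q < p → ¬ w <+: List.drop q cs) → p - c ≤ diff →
      PySem.Chars.findFrom cs w (c : Int) none = (p : Int) := by
  intro diff
  induction diff with
  | zero =>
    intro c p hcp hpre _ hd
    have : c = p := by omega
    subst this
    exact pvFindHere (by have := pvPrefLen hpre hw; omega) hpre
  | succ m ih =>
    intro c p hcp hpre hno hd
    by_cases hcp' : c = p
    · subst hcp'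
      exact pvFindHere (by have := pvPrefLen hpre hw; omega) hpre
    · have hpn : p + w.length ≤ cs.length := pvPrefLen hpre hw
      rw [pvFindStep (by omega) (hno c le_rfl (by omega))]
      exact ih (c + 1) p (by omega) hpre (fun q h1 h2 => hno q (by omega) h2) (by omega)

-- B's greedy pass over the match list = A's find-and-skip loop
theorem greedy_eq (cs w : List Char) (hw : 1 ≤ w.length) :
    ∀ (meas lo c : Nat) (d : PySem.Dict Int (List Char)), c ≤ cs.length →
      (∀ q, c ≤ q → q < lo → ¬ (q + w.length ≤ cs.length ∧ w <+: List.drop q cs)) →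
      cs.length - lo ≤ meas →
      ((matchFrom cs w lo).foldl (greedyStep w) (d, (c : Int))).1
        = findIns cs w (cs.length + 1) (c : Int) d := by
  intro meas
  induction meas with
  | zero =>
    intro lo c d hc hno hm
    have hlo : cs.length ≤ lo := by omega
    rw [matchFrom, dif_neg (by omega)]
    simp only [List.foldl_nil]
    have hfind : PySem.Chars.findFrom cs w (c : Int) none = -1 := by
      rw [PySem.Chars.findFrom_natCast_eq_neg_one_iff cs w c hc, pvInfixDrop]
      rintro ⟨j, hj⟩
      by_cases hq : c + j < cs.length
      · exact hno (c + j) (by omega) (by omega) (pvPrefixMatch hw hj)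
      · have := hj.length_le
        simp [List.length_drop] at this
        omega
    obtain ⟨n0, hn0⟩ : ∃ n0, cs.length + 1 = n0 + 1 := ⟨cs.length, rfl⟩
    rw [hn0]
    simp [findIns, hfind]
  | succ m ih =>
    intro lo c d hc hno hm
    by_cases hlo : lo < cs.length
    · rw [matchFrom, dif_pos hlo]
      by_cases hA : lo + w.length ≤ cs.length ∧ w <+: List.drop lo cs
      · rw [if_pos hA]
        by_cases hclo : c ≤ lo
        · have hge : ((c : Int)) ≤ ((lo : Int)) := by exact_mod_cast hclo
          have hstep : greedyStep w (d, (c : Int)) (lo : Int)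
              = (d.insert (lo : Int) w, (lo : Int) + (w.length : Int)) := by
            unfold greedyStep
            rw [if_pos (show ((lo : Int)) ≥ (d, ((c : Int))).2 by simpa using hge)]
          simp only [List.singleton_append, List.foldl_cons, hstep]
          have hcast : (lo : Int) + (w.length : Int) = (((lo + w.length : Nat)) : Int) := by omega
          rw [hcast]
          rw [ih (lo + 1) (lo + w.length) _ (by omega)
            (fun q h1 h2 => by omega) (by omega)]
          have hfind : PySem.Chars.findFrom cs w (c : Int) none = (lo : Int) :=
            pvFindAt cs w hw (lo - c) c lo hclo hA.2
              (fun q h1 h2 => fun hp => hno q h1 h2 (pvPrefixMatch hw hp)) le_rfl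
          obtain ⟨n0, hn0⟩ : ∃ n0, cs.length + 1 = n0 + 1 := ⟨cs.length, rfl⟩
          have hRHS : findIns cs w (cs.length + 1) ((c : Int)) d
              = findIns cs w n0 (((lo + w.length : Nat)) : Int) (d.insert ((lo : Int)) w) := by
            rw [hn0]
            simp only [findIns, hfind]
            rw [if_neg (by omega : ¬ ((lo : Int)) = -1), hcast]
          rw [hRHS]
          exact findIns_congr cs w hw (cs.length + 1) (lo + w.length) (cs.length + 1) n0 _
            (by omega) (by omega) (by omega) (by omega)
        · have hlt : ((lo : Int)) < ((c : Int)) := by exact_mod_cast Nat.lt_of_not_le hclo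
          have hstep : greedyStep w (d, (c : Int)) (lo : Int) = (d, (c : Int)) := by
            unfold greedyStep
            rw [if_neg (show ¬ ((lo : Int)) ≥ (d, ((c : Int))).2 by simpa using hlt)]
          simp only [List.singleton_append, List.foldl_cons, hstep]
          exact ih (lo + 1) c d hc (fun q h1 h2 => by
            have : q = lo ∧ c ≤ lo := by omega
            exact absurd this.2 hclo) (by omega)
      · rw [if_neg hA]
        simp only [List.nil_append]
        exact ih (lo + 1) c d hc (fun q h1 h2 => by
          by_cases hq : q < lo
          · exact hno q h1 hq
          · have : q = lo := by omega
            subst this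
            exact hA) (by omega)
    · rw [matchFrom, dif_neg hlo]
      simp only [List.foldl_nil]
      have hfind : PySem.Chars.findFrom cs w (c : Int) none = -1 := by
        rw [PySem.Chars.findFrom_natCast_eq_neg_one_iff cs w c hc, pvInfixDrop]
        rintro ⟨j, hj⟩
        by_cases hq : c + j < cs.length
        · exact hno (c + j) (by omega) (by omega) (pvPrefixMatch hw hj)
        · have := hj.length_le
          simp [List.length_drop] at this
          omega
      obtain ⟨n0, hn0⟩ : ∃ n0, cs.length + 1 = n0 + 1 := ⟨cs.length, rfl⟩
      rw [hn0]
      simp [findIns, hfind]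

-- under Pre_, A's and B's dictionaries coincide
theorem dicts_eq (cs : List Char) (words : List String) (h : ∀ w ∈ words, w ≠ "") :
    words.foldl (fun d word =>
      let positions := find_all_occurrences cs word.toList
      if positions = [] then d
      else positions.foldl (fun d p => d.insert p word.toList) d) PySem.Dict.empty
    = words.foldl (fun marks word =>
      ((((PySem.List.pyRange 0 (cs.length : Int)).foldl
          (fun occ i => (PySem.List.sorted
              (PySem.Set.ofList (words.map (fun x => ((x.toList.length : Int))))) (fun x => x) false).foldl
            (occInner cs (PySem.Set.ofList (words.map (fun x => x.toList))) i) occ)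
          (PySem.Dict.empty : PySem.Dict (List Char) (List Int))).getD word.toList []).foldl
        (greedyStep word.toList) (marks, 0)).1) PySem.Dict.empty := by
  apply PySem.List.foldl_congr_mem
  intro d w hw
  have hwne : w.toList ≠ [] := fun he => h w hw (by
    have := congrArg String.ofList he
    simpa using this)
  have hw1 : 1 ≤ w.toList.length := by
    cases hl : w.toList with
    | nil => exact absurd hl hwne
    | cons a t => simp
  have hocc : (((PySem.List.pyRange 0 (cs.length : Int)).foldl
        (fun occ i => (PySem.List.sorted
            (PySem.Set.ofList (words.map (fun x => ((x.toList.length : Int))))) (fun x => x) false).foldl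
          (occInner cs (PySem.Set.ofList (words.map (fun x => x.toList))) i) occ)
        (PySem.Dict.empty : PySem.Dict (List Char) (List Int))).getD w.toList [])
      = matchFrom cs w.toList 0 := by
    have h0 : ((0 : Nat) : Int) = (0 : Int) := rfl
    have := occ_build cs words cs.length 0
      (PySem.Dict.empty : PySem.Dict (List Char) (List Int)) (by omega) (by omega)
      w.toList (List.mem_map.2 ⟨w, hw, rfl⟩)
    rw [h0] at this
    rw [this]
    simp [PySem.Dict.getD, PySem.Dict.get?_empty]
  rw [hocc]
  have h0 : ((0 : Nat) : Int) = (0 : Int) := rfl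
  have hgreedy := greedy_eq cs w.toList hw1 cs.length 0 0 d (by omega)
    (fun q h1 h2 => by omega) (by omega)
  rw [h0] at hgreedy
  rw [hgreedy]
  have hfold : (find_all_occurrences cs w.toList).foldl (fun d p => d.insert p w.toList) d
      = findIns cs w.toList (cs.length + 1) 0 d := fold_findAllGo cs w.toList _ 0 d
  by_cases hp : find_all_occurrences cs w.toList = []
  · rw [if_pos hp, ← hfold, hp, List.foldl_nil]
  · rw [if_neg hp, hfold]

-- ---- dictionary invariant: keys are valid match positions of nonempty words ----

def DInv (cs : List Char) (d : PySem.Dict Int (List Char)) : Prop :=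
  ∀ p v, d.get? p = some v → 0 ≤ p ∧ 1 ≤ v.length ∧ p.toNat + v.length ≤ cs.length

theorem DInv_insert {cs : List Char} {d : PySem.Dict Int (List Char)} {k : Int} {v : List Char}
    (hd : DInv cs d) (h0 : 0 ≤ k) (h1 : 1 ≤ v.length) (h2 : k.toNat + v.length ≤ cs.length) :
    DInv cs (d.insert k v) := by
  intro p u hpu
  by_cases hpk : p = k
  · subst hpk
    rw [PySem.Dict.get?_insert_self] at hpu
    cases hpu
    exact ⟨h0, h1, h2⟩
  · rw [PySem.Dict.get?_insert_of_ne d v hpk] at hpu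
    exact hd p u hpu

theorem DInv_findIns (cs w : List Char) (hw : 1 ≤ w.length) :
    ∀ (f k : Nat) (d : PySem.Dict Int (List Char)), k ≤ cs.length → DInv cs d →
      DInv cs (findIns cs w f (k : Int) d) := by
  intro f
  induction f with
  | zero => intro k d _ hd; exact hd
  | succ f ih =>
    intro k d hk hd
    simp only [findIns]
    by_cases h : PySem.Chars.findFrom cs w (k : Int) none = -1
    · simp only [h, if_true]; exact hd
    · simp only [h, if_false]
      obtain ⟨h1, h2, h3⟩ := PySem.Chars.findFrom_natCast_spec cs w k hk h
      set r := PySem.Chars.findFrom cs w (k : Int) none with hr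
      have hr0 : (0:Int) ≤ r := le_trans (by positivity) h1
      have hlen : r.toNat + w.length ≤ cs.length := pvPrefLen h2 hw
      have hcast : r + (w.length : Int) = ((r.toNat + w.length : Nat) : Int) := by omega
      rw [hcast]
      exact ih (r.toNat + w.length) _ (by omega) (DInv_insert hd hr0 hw hlen)

theorem nodup_findIns (cs w : List Char) :
    ∀ (f : Nat) (s : Int) (d : PySem.Dict Int (List Char)), d.keys.Nodup →
      (findIns cs w f s d).keys.Nodup := by
  intro f
  induction f with
  | zero => intro s d hd; exact hd
  | succ f ih =>
    intro s d hd
    simp only [findIns]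
    by_cases h : PySem.Chars.findFrom cs w s none = -1
    · simp only [h, if_true]; exact hd
    · simp only [h, if_false]
      exact ih _ _ (PySem.Dict.nodup_keys_insert d _ _ hd)

theorem dict_props (cs : List Char) (words : List String) (h : ∀ w ∈ words, w ≠ "") :
    DInv cs (words.foldl (fun d word =>
      let positions := find_all_occurrences cs word.toList
      if positions = [] then d
      else positions.foldl (fun d p => d.insert p word.toList) d) PySem.Dict.empty)
    ∧ (words.foldl (fun d word =>
      let positions := find_all_occurrences cs word.toList
      if positions = [] then d
      else positions.foldl (fun d p => d.insert p word.toList) d) PySem.Dict.empty).keys.Nodup := by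
  suffices hgen : ∀ (d : PySem.Dict Int (List Char)), DInv cs d → d.keys.Nodup →
      DInv cs (words.foldl _ d) ∧ (words.foldl _ d).keys.Nodup by
    exact hgen PySem.Dict.empty
      (fun p v hpv => by rw [PySem.Dict.get?_empty] at hpv; cases hpv)
      PySem.Dict.nodup_keys_empty
  induction words with
  | nil => intro d h1 h2; exact ⟨h1, h2⟩
  | cons w ws ih =>
    intro d h1 h2
    simp only [List.foldl_cons]
    have hwne : w.toList ≠ [] := fun he => h w (by simp) (by
      have := congrArg String.ofList he
      simpa using this)
    have hw1 : 1 ≤ w.toList.length := by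
      cases hl : w.toList with
      | nil => exact absurd hl hwne
      | cons a t => simp
    have hstep : DInv cs (if find_all_occurrences cs w.toList = [] then d
          else (find_all_occurrences cs w.toList).foldl (fun d p => d.insert p w.toList) d)
        ∧ (if find_all_occurrences cs w.toList = [] then d
          else (find_all_occurrences cs w.toList).foldl (fun d p => d.insert p w.toList) d).keys.Nodup := by
      by_cases hp : find_all_occurrences cs w.toList = []
      · simp only [hp, if_true]; exact ⟨h1, h2⟩
      · rw [if_neg hp,
          show find_all_occurrences cs w.toList = findAllGo cs w.toList (cs.length + 1) 0 [] from rfl,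
          fold_findAllGo]
        constructor
        · have := DInv_findIns cs w.toList hw1 (cs.length + 1) 0 d (by omega) h1
          simpa using this
        · exact nodup_findIns cs w.toList _ _ d h2
    exact ih (fun v hv => h v (by simp [hv])) _ hstep.1 hstep.2

-- ---- rendering ----

theorem renderA_acc (cs : List Char) (d : PySem.Dict Int (List Char)) :
    ∀ (fuel i : Nat) (acc : List Char),
      boldRenderGo cs d fuel i acc = acc ++ boldRenderGo cs d fuel i [] := by
  intro fuel
  induction fuel with
  | zero => intro i acc; simp [boldRenderGo]
  | succ f ih =>
    intro i acc
    by_cases hi : i < cs.length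
    · cases hg : d.get? (i : Int) with
      | some w =>
        simp only [boldRenderGo, hi, if_true, hg]
        rw [ih _ (acc ++ _), ih _ ([] ++ _)]; simp
      | none =>
        cases hc : PySem.List.pyGet? cs (i : Int) with
        | some c =>
          simp only [boldRenderGo, hi, if_true, hg, hc]
          rw [ih _ (acc ++ _), ih _ ([] ++ _)]; simp
        | none =>
          exfalso
          rw [PySem.List.pyGet?_natCast, List.getElem?_eq_getElem hi] at hc
          cases hc
    · simp [boldRenderGo, hi]

theorem renderB_acc (cs : List Char) (d : PySem.Dict Int (List Char)) :
    ∀ (ps : List Int) (i : Int) (parts : List (List Char)),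
      renderBGo cs d ps i parts = parts ++ renderBGo cs d ps i [] := by
  intro ps
  induction ps with
  | nil => intro i parts; simp [renderBGo]
  | cons p t ih =>
    intro i parts
    simp only [renderBGo]
    by_cases hp : p < i
    · simp only [hp, if_true]; exact ih i parts
    · simp only [hp, if_false]
      rw [ih _ (parts ++ _), ih _ ([] ++ _)]
      simp

-- fuel irrelevance for A's render loop, given the dictionary invariant
theorem renderA_congr (cs : List Char) (d : PySem.Dict Int (List Char)) (hd : DInv cs d) :
    ∀ (meas i f f' : Nat), i ≤ cs.length →
      cs.length + 1 - i ≤ meas → cs.length + 1 - i ≤ f → cs.length + 1 - i ≤ f' →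
      boldRenderGo cs d f i [] = boldRenderGo cs d f' i [] := by
  intro meas
  induction meas with
  | zero => intro i f f' hi hm _ _; omega
  | succ m ih =>
    intro i f f' hi hm hf hf'
    obtain ⟨f1, rfl⟩ : ∃ f1, f = f1 + 1 := ⟨f - 1, by omega⟩
    obtain ⟨f2, rfl⟩ : ∃ f2, f' = f2 + 1 := ⟨f' - 1, by omega⟩
    by_cases hil : i < cs.length
    · cases hg : d.get? (i : Int) with
      | some w =>
        obtain ⟨_, hw1, hwl⟩ := hd _ _ hg
        have hwl' : i + w.length ≤ cs.length := by simpa using hwl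
        simp only [boldRenderGo, hil, if_true, hg]
        rw [renderA_acc cs d f1, renderA_acc cs d f2]
        rw [ih (i + w.length) f1 f2 (by omega) (by omega) (by omega) (by omega)]
      | none =>
        cases hc : PySem.List.pyGet? cs (i : Int) with
        | some c =>
          simp only [boldRenderGo, hil, if_true, hg, hc]
          rw [renderA_acc cs d f1, renderA_acc cs d f2]
          rw [ih (i + 1) f1 f2 (by omega) (by omega) (by omega) (by omega)]
        | none =>
          exfalso
          rw [PySem.List.pyGet?_natCast, List.getElem?_eq_getElem hil] at hc
          cases hc
    · simp [boldRenderGo, hil]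

-- with no stored position at or beyond i, A's loop copies the tail verbatim
theorem renderA_tail (cs : List Char) (d : PySem.Dict Int (List Char)) :
    ∀ (meas i f : Nat), i ≤ cs.length →
      (∀ q v, d.get? q = some v → (i : Int) ≤ q → False) →
      cs.length + 1 - i ≤ meas → cs.length + 1 - i ≤ f →
      boldRenderGo cs d f i [] = List.drop i cs := by
  intro meas
  induction meas with
  | zero => intro i f hi _ hm _; omega
  | succ m ih =>
    intro i f hi hno hm hf
    obtain ⟨f1, rfl⟩ : ∃ f1, f = f1 + 1 := ⟨f - 1, by omega⟩
    by_cases hil : i < cs.length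
    · cases hg : d.get? (i : Int) with
      | some w => exact absurd (hno _ _ hg le_rfl) (by simp)
      | none =>
        have hc : PySem.List.pyGet? cs (i : Int) = some cs[i] := by
          rw [PySem.List.pyGet?_natCast]
          exact List.getElem?_eq_getElem hil
        simp only [boldRenderGo, hil, if_true, hg, hc]
        rw [renderA_acc]
        rw [ih (i + 1) f1 (by omega) (fun q v hq hle => hno q v hq (by omega)) (by omega) (by omega)]
        simp only [List.nil_append, List.singleton_append]
        exact (List.drop_eq_getElem_cons hil).symm
    · simp only [boldRenderGo, hil, if_false]
      have : i = cs.length := by omega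
      simp [this]

-- with no stored position in [i, p), A's loop copies the slice [i, p) verbatim
theorem renderA_gap (cs : List Char) (d : PySem.Dict Int (List Char)) (hd : DInv cs d) :
    ∀ (meas i p f : Nat), i ≤ p → p ≤ cs.length →
      (∀ q v, d.get? q = some v → (i : Int) ≤ q → q < (p : Int) → False) →
      p - i ≤ meas → cs.length + 1 - i ≤ f →
      boldRenderGo cs d f i [] = (List.drop i cs).take (p - i) ++ boldRenderGo cs d (cs.length + 1) p [] := by
  intro meas
  induction meas with
  | zero =>
    intro i p f hip hp hno hm hf
    have : p = i := by omega
    subst this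
    simp only [Nat.sub_self, List.take_zero, List.nil_append]
    exact renderA_congr cs d hd (cs.length + 1) p f (cs.length + 1) (by omega) (by omega) hf (by omega)
  | succ m ih =>
    intro i p f hip hp hno hm hf
    by_cases hpi : i = p
    · subst hpi
      simp only [Nat.sub_self, List.take_zero, List.nil_append]
      exact renderA_congr cs d hd (cs.length + 1) i f (cs.length + 1) (by omega) (by omega) hf (by omega)
    · have hil : i < cs.length := by omega
      obtain ⟨f1, rfl⟩ : ∃ f1, f = f1 + 1 := ⟨f - 1, by omega⟩
      set RHS := boldRenderGo cs d (cs.length + 1) p [] with hRHS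
      cases hg : d.get? (i : Int) with
      | some w => exact absurd (hno _ _ hg le_rfl (by omega)) (by simp)
      | none =>
        have hc : PySem.List.pyGet? cs (i : Int) = some cs[i] := by
          rw [PySem.List.pyGet?_natCast]
          exact List.getElem?_eq_getElem hil
        simp only [boldRenderGo, hil, if_true, hg, hc]
        rw [renderA_acc]
        rw [ih (i + 1) p f1 (by omega) hp
          (fun q v hq h1 h2 => hno q v hq (by omega) h2) (by omega) (by omega)]
        have hdrop : List.drop i cs = cs[i] :: List.drop (i + 1) cs := List.drop_eq_getElem_cons hil
        rw [hdrop]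
        have hsub : p - i = (p - (i+1)) + 1 := by omega
        rw [hsub, List.take_succ_cons]
        simp only [List.nil_append, List.cons_append]
        rw [hRHS]

-- the main render equivalence: A's char-by-char loop = B's slice-between-sorted-positions loop
theorem render_eq (cs : List Char) (d : PySem.Dict Int (List Char)) (hd : DInv cs d) :
    ∀ (ps : List Int) (i f : Nat), i ≤ cs.length →
      List.Pairwise (· < ·) ps →
      (∀ q ∈ ps, ∃ v, d.get? q = some v) →
      (∀ q v, d.get? q = some v → (i : Int) ≤ q → q ∈ ps) →
      cs.length + 1 - i ≤ f →
      boldRenderGo cs d f i [] = (renderBGo cs d ps (i : Int) []).flatten := by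
  intro ps
  induction ps with
  | nil =>
    intro i f hi _ _ hcomp hf
    simp only [renderBGo, List.nil_append, List.flatten_cons, List.flatten_nil, List.append_nil]
    rw [PySem.List.slice_from_natCast]
    exact renderA_tail cs d (cs.length + 1) i f hi
      (fun q v hq hle => by
        have := hcomp q v hq hle
        simp at this) (by omega) hf
  | cons p t ih =>
    intro i f hi hpw hmem hcomp hf
    obtain ⟨v, hv⟩ := hmem p (by simp)
    obtain ⟨hp0, hv1, hvl⟩ := hd _ _ hv
    obtain ⟨pn, rfl⟩ : ∃ pn : Nat, p = (pn : Int) := ⟨p.toNat, by omega⟩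
    simp only [Int.toNat_natCast] at hvl
    by_cases hpi : (pn : Int) < (i : Int)
    · simp only [renderBGo, hpi, if_true]
      exact ih i f hi hpw.of_cons (fun q hq => hmem q (by simp [hq]))
        (fun q v' hq hle => by
          rcases List.mem_cons.mp (hcomp q v' hq hle) with h | h
          · exfalso; omega
          · exact h) hf
    · -- i ≤ pn
      have hipn : i ≤ pn := by omega
      have hgap : ∀ q v', d.get? q = some v' → (i : Int) ≤ q → q < (pn : Int) → False := by
        intro q v' hq h1 h2
        rcases List.mem_cons.mp (hcomp q v' hq h1) with h | h
        · omega
        · have := (List.pairwise_cons.1 hpw).1 q h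
          omega
      rw [renderA_gap cs d hd (pn - i) i pn f hipn (by omega) hgap (by omega) hf]
      -- unfold A at pn
      have hpnl : pn < cs.length := by omega
      have hA : boldRenderGo cs d (cs.length + 1) pn [] =
          (pvBoldPre ++ v ++ pvBoldPost) ++ boldRenderGo cs d cs.length (pn + v.length) [] := by
        have hunf : boldRenderGo cs d (cs.length + 1) pn [] =
            boldRenderGo cs d cs.length (pn + v.length) ([] ++ (pvBoldPre ++ v ++ pvBoldPost)) := by
          simp only [boldRenderGo, hpnl, if_true, hv]
        rw [hunf, renderA_acc]
        simp
      rw [hA]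
      have hstep : boldRenderGo cs d cs.length (pn + v.length) [] =
          boldRenderGo cs d (cs.length + 1) (pn + v.length) [] :=
        renderA_congr cs d hd (cs.length + 1) (pn + v.length) cs.length (cs.length + 1)
          (by omega) (by omega) (by omega) (by omega)
      rw [hstep]
      rw [ih (pn + v.length) (cs.length + 1) (by omega) hpw.of_cons
        (fun q hq => hmem q (by simp [hq]))
        (fun q v' hq hle => by
          rcases List.mem_cons.mp (hcomp q v' hq (by omega)) with h | h
          · exfalso; omega
          · exact h) (by omega)]
      -- B side
      simp only [renderBGo, hpi, if_false]
      have hgd : d.getD (pn : Int) [] = v := by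
        simp [PySem.Dict.getD, hv]
      rw [hgd]
      have hcast : (pn : Int) + (v.length : Int) = ((pn + v.length : Nat) : Int) := by omega
      rw [hcast, PySem.List.slice_natCast]
      simp only [List.nil_append]
      rw [renderB_acc cs d t (((pn + v.length : Nat)) : Int)
          [List.take (pn - i) (List.drop i cs), pvBoldPre ++ v ++ pvBoldPost]]
      simp [List.append_assoc]

theorem joinNilFlatten : ∀ xs : List (List Char), PySem.Chars.join [] xs = xs.flatten
  | [] => PySem.Chars.join_nil []
  | [a] => by rw [PySem.Chars.join_singleton]; simp
  | a :: b :: t => by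
    rw [PySem.Chars.join_cons_cons, joinNilFlatten (b :: t)]
    simp

-- strictly increasing sorted key list
theorem sorted_keys_strict {l : List Int} (hnd : l.Nodup) :
    List.Pairwise (· < ·) (PySem.List.sorted l (fun x => x) false) := by
  have h1 : List.Pairwise (fun a b : Int => a ≤ b) (PySem.List.sorted l (fun x => x) false) :=
    PySem.List.sorted_pairwise l (fun x => x)
  have h2 : (PySem.List.sorted l (fun x => x) false).Nodup :=
    ((PySem.List.sorted_perm l (fun x => x) false).nodup_iff).2 hnd
  exact (h1.and h2).imp (fun h => lt_of_le_of_ne h.1 h.2)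

-- ===== VERDICT (by name: the statement is the Claim_ definition above) =====
theorem bold_doc_spec : Claim_equal_bold_doc := by
  intro content words _hdom hpre
  unfold Spec_bold_doc bold_doc bold_doc_alt
  simp only []
  set cs := content.toList with hcs
  have hpre' : ∀ w ∈ words, w ≠ "" := hpre
  rw [← dicts_eq cs words hpre']
  set d := words.foldl (fun d word =>
    let positions := find_all_occurrences cs word.toList
    if positions = [] then d
    else positions.foldl (fun d p => d.insert p word.toList) d) PySem.Dict.empty with hdd
  obtain ⟨hinv, hnd⟩ := dict_props cs words hpre'
  rw [← hdd] at hinv hnd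
  congr 1
  rw [joinNilFlatten]
  have h0 : ((0 : Nat) : Int) = (0 : Int) := rfl
  rw [← h0]
  exact render_eq cs d hinv (PySem.List.sorted d.keys (fun x => x) false) 0 (cs.length + 1)
    (by omega)
    (sorted_keys_strict hnd)
    (fun q hq => by
      rw [PySem.List.mem_sorted] at hq
      cases hg : d.get? q with
      | some v => exact ⟨v, rfl⟩
      | none => exact absurd hq ((PySem.Dict.get?_eq_none_iff_not_mem_keys d q).1 hg)
    )
    (fun q v hq _ => by
      rw [PySem.List.mem_sorted]
      by_contra hmem
      rw [← PySem.Dict.get?_eq_none_iff_not_mem_keys] at hmem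
      rw [hq] at hmem
      cases hmem)
    (by omega)
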